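-- pv_equiv track=rewrite | github.com/JoonasPel/AdventOfCode | 2024/Day5/main.py | valid_update
-- ===== SOURCE A (Python) =====
-- def valid_update(update, orders):
--     prev_numbers = []
--     for number in update:
--         for prev_num in prev_numbers:
--             if number in orders and prev_num in orders[number]:
--                 return False
--         prev_numbers.append(number)
--     return True
-- ===== SOURCE B (Python) =====
-- def valid_update(update, orders):
--     # first-occurrence index of each value in update
--     index = {}
--     for j, number in enumerate(update):
--         if number not in index:
--             index[number] = j
--     # single pass over the constraints instead of scanning the growing prefix
--     for j, number in enumerate(update):
--         if number in orders:
--             for v in orders[number]: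
--                 if v in index and index[v] < j:
--                     return False
--     return True
-- ===== Notes on version B (the rewrite author's own statement) =====
-- stated objective: alternative
-- what changed: Instead of scanning the growing list of previous numbers for every element (a quadratic pass), B builds a first-occurrence index table once and then, for each element, checks each of its constraint values by a table lookup (stored index < current position).
import Mathlib
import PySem

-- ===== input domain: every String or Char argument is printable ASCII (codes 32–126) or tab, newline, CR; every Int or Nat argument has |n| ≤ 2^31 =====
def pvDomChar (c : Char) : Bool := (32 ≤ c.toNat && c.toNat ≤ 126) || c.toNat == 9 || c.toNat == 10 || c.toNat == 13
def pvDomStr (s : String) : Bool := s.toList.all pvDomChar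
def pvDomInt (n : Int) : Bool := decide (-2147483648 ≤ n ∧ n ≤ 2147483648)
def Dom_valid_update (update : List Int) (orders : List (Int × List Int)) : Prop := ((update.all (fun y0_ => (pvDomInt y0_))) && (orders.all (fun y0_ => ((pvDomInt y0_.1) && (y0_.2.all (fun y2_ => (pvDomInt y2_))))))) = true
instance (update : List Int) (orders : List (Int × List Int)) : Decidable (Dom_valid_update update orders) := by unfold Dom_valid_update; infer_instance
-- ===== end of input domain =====

-- B replaces A's scan over the growing previous-numbers list by a first-occurrence
-- index table consulted per constraint value (objective: alternative decomposition).


-- ===== PORT A =====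
-- dict lookup on the association list (first match = Python dict lookup; exact)
def pvLookup (orders : List (Int × List Int)) (k : Int) : Option (List Int) :=
  (orders.find? (fun p => p.1 == k)).map (·.2)

-- 'number in orders and prev_num in orders[number]'
def vuBad (orders : List (Int × List Int)) (number prev_num : Int) : Bool :=
  match pvLookup orders number with
  | some l => l.contains prev_num
  | none => false

-- A's loop: scan prev_numbers; on a hit return False, else append number
def vuA_loop (orders : List (Int × List Int)) : List Int → List Int → Bool
  | _, [] => true
  | prev, number :: rest =>
    if prev.any (fun p => vuBad orders number p) then false
    else vuA_loop orders (prev ++ [number]) rest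

def valid_update (update : List Int) (orders : List (Int × List Int)) : Bool :=
  vuA_loop orders [] update

-- ===== PORT B =====
-- B's first loop: first-occurrence index table (record a value only when unseen)
def vuB_index (update : List Int) : PySem.Dict Int Int :=
  (PySem.List.enumerate update 0).foldl
    (fun d p => if d.contains p.2 then d else d.insert p.2 p.1) PySem.Dict.empty

-- B's second loop: per element, check each constraint value by a table lookup
def valid_update_alt (update : List Int) (orders : List (Int × List Int)) : Bool :=
  let index := vuB_index update
  (PySem.List.enumerate update 0).all (fun p =>
    match pvLookup orders p.2 with
    | none => true
    | some l => l.all (fun v =>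
        match index.get? v with
        | some i => !(i < p.1)
        | none => true))

-- ===== PRECONDITION & SPEC =====
def Spec_valid_update (update : List Int) (orders : List (Int × List Int)) (out : Bool) : Prop := out = valid_update_alt update orders
instance (update : List Int) (orders : List (Int × List Int)) (out : Bool) : Decidable (Spec_valid_update update orders out) := by unfold Spec_valid_update; infer_instance

-- ===== CLAIM (what is proved, stated in full; the proofs are below) =====
def Claim_equal_valid_update : Prop := ∀ (update : List Int) (orders : List (Int × List Int)), Dom_valid_update update orders → Spec_valid_update update orders (valid_update update orders)

-- ===== LEMMAS AND PROOFS =====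

-- 'first occurrence of v is < j' ↔ 'v occurs among the first j elements'
theorem idxOf?_lt_iff_mem_take (l : List Int) (v : Int) (j : Nat) :
    (∃ k, l.idxOf? v = some k ∧ k < j) ↔ v ∈ l.take j := by
  induction l generalizing j with
  | nil => simp
  | cons x xs ih =>
    cases j with
    | zero => simp
    | succ j =>
      rw [List.take_succ_cons]
      by_cases hx : x = v
      · subst hx; simp [List.idxOf?_cons]
      · simp only [List.idxOf?_cons, beq_iff_eq, hx, if_false, List.mem_cons]
        constructor
        · rintro ⟨k, hk, hlt⟩
          simp only [Option.map_eq_some_iff] at hk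
          obtain ⟨k', hk', rfl⟩ := hk
          exact Or.inr ((ih j).mp ⟨k', hk', by omega⟩)
        · rintro (h | h)
          · exact absurd h.symm hx
          · obtain ⟨k, hk, hlt⟩ := (ih j).mpr h
            exact ⟨k + 1, by simp [hk], by omega⟩

-- B's index-building fold holds the first-occurrence position (offset by the start s)
theorem vuB_index_fold (l : List Int) (d : PySem.Dict Int Int) (s : Int) (v : Int) :
    ((PySem.List.enumerate l s).foldl
      (fun d p => if d.contains p.2 then d else d.insert p.2 p.1) d).get? v =
    match d.get? v with
    | some i => some i
    | none => (l.idxOf? v).map (fun k => s + (k : Int)) := by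
  induction l generalizing d s with
  | nil => cases h : d.get? v <;> simp [PySem.List.enumerate, h]
  | cons x xs ih =>
    rw [PySem.List.enumerate_cons, List.foldl_cons]
    simp only
    by_cases hc : d.contains x
    · rw [if_pos hc, ih]
      cases h : d.get? v with
      | some i => simp
      | none =>
        have hvx : v ≠ x := by
          intro h'; subst h'
          rw [PySem.Dict.contains_eq_isSome_get?, h] at hc; simp at hc
        rw [List.idxOf?_cons]
        simp only [beq_iff_eq, if_neg (fun h' : x = v => hvx h'.symm)]
        cases xs.idxOf? v <;> simp <;> ring
    · rw [if_neg hc, ih]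
      have hdn : d.get? x = none := by
        rw [PySem.Dict.contains_eq_isSome_get?] at hc
        cases h : d.get? x <;> simp [h] at hc ⊢
      by_cases hvx : v = x
      · subst hvx
        rw [PySem.Dict.get?_insert_self, hdn, List.idxOf?_cons]
        simp
      · rw [PySem.Dict.get?_insert_of_ne d s hvx]
        cases h : d.get? v with
        | some i => simp
        | none =>
          rw [List.idxOf?_cons]
          simp only [beq_iff_eq, if_neg (fun h' : x = v => hvx h'.symm)]
          cases xs.idxOf? v <;> simp <;> ring

theorem vuB_index_get? (update : List Int) (v : Int) :
    (vuB_index update).get? v = (update.idxOf? v).map (fun k => (k : Int)) := by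
  rw [vuB_index, vuB_index_fold]
  simp [PySem.Dict.get?_empty]

-- A's loop, characterised
theorem vuA_loop_iff (orders : List (Int × List Int)) (rest prev : List Int) :
    vuA_loop orders prev rest = true ↔
    ∀ k : Nat, (h : k < rest.length) →
      ∀ p ∈ prev ++ rest.take k, vuBad orders rest[k] p = false := by
  induction rest generalizing prev with
  | nil => simp [vuA_loop]
  | cons n rest ih =>
    rw [vuA_loop]
    by_cases hany : prev.any (fun p => vuBad orders n p) = true
    · rw [if_pos hany]
      refine iff_of_false (by simp) ?_
      intro hall
      obtain ⟨p, hp, hbad⟩ := List.any_eq_true.mp hany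
      have := hall 0 (by simp) p (by simpa using hp)
      simp only [List.getElem_cons_zero] at this
      simp [this] at hbad
    · rw [if_neg hany, ih]
      have hprev : ∀ p ∈ prev, vuBad orders n p = false := by
        intro p hp
        by_contra h
        exact hany (List.any_eq_true.mpr ⟨p, hp, by simpa using h⟩)
      constructor
      · intro hall k hk p hp
        cases k with
        | zero =>
          simp only [List.take_zero, List.append_nil] at hp
          simpa using hprev p hp
        | succ k =>
          have := hall k (by simpa using hk) p
          simp only [List.take_succ_cons, List.getElem_cons_succ] at hp ⊢
          apply this
          simp only [List.append_assoc, List.singleton_append] at *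
          simpa using hp
      · intro hall k hk p hp
        have := hall (k + 1) (by simpa using hk) p
        simp only [List.take_succ_cons, List.getElem_cons_succ] at this
        apply this
        simp only [List.append_assoc, List.singleton_append] at *
        simpa using hp

-- B, characterised by the same condition
theorem vuB_iff (update : List Int) (orders : List (Int × List Int)) :
    valid_update_alt update orders = true ↔
    ∀ k : Nat, (h : k < update.length) →
      ∀ p ∈ update.take k, vuBad orders update[k] p = false := by
  rw [valid_update_alt]
  simp only [List.all_eq_true]
  constructor
  · intro hall k hk p hp
    have h1 := hall (((k : Int), update[k])) (by
      rw [PySem.List.mem_enumerate_iff]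
      exact ⟨k, hk, by simp⟩)
    unfold vuBad
    cases hl : pvLookup orders update[k] with
    | none => rfl
    | some l =>
      simp only [hl, List.all_eq_true] at h1
      by_contra hc
      have hpl : p ∈ l := by
        unfold vuBad at hc
        simpa using hc
      have h2 := h1 p hpl
      obtain ⟨i, hi, hilt⟩ := (idxOf?_lt_iff_mem_take update p k).mpr hp
      rw [vuB_index_get?, hi] at h2
      simp at h2
      omega
  · intro hall q hq
    rw [PySem.List.mem_enumerate_iff] at hq
    obtain ⟨k, hk, rfl⟩ := hq
    simp only [zero_add]
    cases hl : pvLookup orders update[k] with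
    | none => rfl
    | some l =>
      simp only [List.all_eq_true]
      intro v hv
      rw [vuB_index_get?]
      cases hi : update.idxOf? v with
      | none => rfl
      | some i =>
        by_cases hlt : (i : Int) < (k : Int)
        · exfalso
          have hmem : v ∈ update.take k := (idxOf?_lt_iff_mem_take update v k).mp ⟨i, hi, by exact_mod_cast hlt⟩
          have := hall k hk v hmem
          unfold vuBad at this
          rw [hl] at this
          simp [hv] at this
        · simpa using hlt

-- ===== VERDICT (by name: the statement is the Claim_ definition above) =====
theorem valid_update_spec : Claim_equal_valid_update := by
  intro update orders _
  unfold Spec_valid_update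
  rw [Bool.eq_iff_iff]
  unfold valid_update
  rw [vuA_loop_iff, vuB_iff]
  simp
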